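-- pv_equiv track=rewrite | github.com/flutter-gis/Flutter-Earth | web_crawler/lightweight_crawler.py | is_utility_link
-- ===== SOURCE A (Python) =====
-- def is_utility_link(href, text):
--     """Check if a link is utility/non-content"""
--     utility_patterns = [
--         'javascript:', 'mailto:', 'tel:', 'sms:', 'ftp://',
--         'chrome://', 'about:', 'data:', 'file://', 'view-source:'
--     ]
--
--     # Check for utility protocols
--     if any(pattern in href.lower() for pattern in utility_patterns):
--         return True
--
--     # Check for utility text
--     utility_indicators = [
--         'print', 'download', 'export', 'save', 'bookmark', 'favorite',
--         'share', 'email', 'copy link', 'permalink', 'qr code',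
--         'accessibility', 'language', 'translate', 'search', 'filter',
--         'sort', 'refresh', 'reload', 'back', 'forward', 'close'
--     ]
--
--     if any(indicator in text.lower() for indicator in utility_indicators):
--         return True
--
--     return False
-- ===== SOURCE B (Python) =====
-- # Single forward scan over each lowered string: at every start position test all
-- # patterns with startswith, instead of one substring-membership pass per pattern.
--
-- def _scan_any(s, pats):
--     for i in range(len(s)):
--         for p in pats:
--             if s.startswith(p, i):
--                 return True
--     return False
--
--
-- def is_utility_link(href, text):
--     """Check if a link is utility/non-content"""
--     utility_patterns = [
--         'javascript:', 'mailto:', 'tel:', 'sms:', 'ftp://',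
--         'chrome://', 'about:', 'data:', 'file://', 'view-source:'
--     ]
--     if _scan_any(href.lower(), utility_patterns):
--         return True
--
--     utility_indicators = [
--         'print', 'download', 'export', 'save', 'bookmark', 'favorite',
--         'share', 'email', 'copy link', 'permalink', 'qr code',
--         'accessibility', 'language', 'translate', 'search', 'filter',
--         'sort', 'refresh', 'reload', 'back', 'forward', 'close'
--     ]
--     return _scan_any(text.lower(), utility_indicators)
-- ===== Notes on version B (the rewrite author's own statement) =====
-- stated objective: alternative
-- what changed: Replaces the per-pattern substring-membership loop ('pattern in s' for each pattern) with a single forward scan over each lowered string that tests all patterns via startswith at every position.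
import Mathlib
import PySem

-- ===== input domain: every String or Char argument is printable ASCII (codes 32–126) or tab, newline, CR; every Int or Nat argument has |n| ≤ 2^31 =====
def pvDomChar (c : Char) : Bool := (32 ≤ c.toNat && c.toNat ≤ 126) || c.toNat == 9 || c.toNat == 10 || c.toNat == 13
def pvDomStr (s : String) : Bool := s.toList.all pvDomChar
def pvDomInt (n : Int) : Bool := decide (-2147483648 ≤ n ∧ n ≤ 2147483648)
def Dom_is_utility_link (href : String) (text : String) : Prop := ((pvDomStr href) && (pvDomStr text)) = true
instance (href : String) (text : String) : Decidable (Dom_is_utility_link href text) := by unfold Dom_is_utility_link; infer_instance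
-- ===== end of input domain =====

-- B replaces the per-pattern substring-membership loop with a single forward scan
-- testing all patterns via startswith at each position (alternative, same cost).

-- ===== PORT A =====
def pvUtilityPatterns : List String :=
  ["javascript:", "mailto:", "tel:", "sms:", "ftp://",
   "chrome://", "about:", "data:", "file://", "view-source:"]

def pvUtilityIndicators : List String :=
  ["print", "download", "export", "save", "bookmark", "favorite",
   "share", "email", "copy link", "permalink", "qr code",
   "accessibility", "language", "translate", "search", "filter",
   "sort", "refresh", "reload", "back", "forward", "close"]

def is_utility_link (href : String) (text : String) : Bool :=
  if pvUtilityPatterns.any (fun p => PySem.Str.isIn p (PySem.Str.lower href)) then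
    true
  else if pvUtilityIndicators.any (fun p => PySem.Str.isIn p (PySem.Str.lower text)) then
    true
  else
    false

-- ===== PORT B =====
-- _scan_any: walk the positions of s; at each suffix test every pattern with startswith
def pvScanAny (pats : List (List Char)) : List Char → Bool
  | [] => false
  | c :: rest =>
      pats.any (fun p => PySem.Chars.startswith (c :: rest) p) || pvScanAny pats rest

def is_utility_link_alt (href : String) (text : String) : Bool :=
  if pvScanAny (pvUtilityPatterns.map String.toList) (PySem.Chars.lower href.toList) then
    true
  else
    pvScanAny (pvUtilityIndicators.map String.toList) (PySem.Chars.lower text.toList)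

-- ===== PRECONDITION & SPEC =====
def Spec_is_utility_link (href : String) (text : String) (out : Bool) : Prop := out = is_utility_link_alt href text
instance (href : String) (text : String) (out : Bool) : Decidable (Spec_is_utility_link href text out) := by unfold Spec_is_utility_link; infer_instance

-- ===== CLAIM (what is proved, stated in full; the proofs are below) =====
def Claim_equal_is_utility_link : Prop := ∀ (href : String) (text : String), Dom_is_utility_link href text → Spec_is_utility_link href text (is_utility_link href text)

-- ===== LEMMAS AND PROOFS =====

theorem any_or_split {α : Type} (xs : List α) (f g : α → Bool) :
    xs.any (fun a => f a || g a) = (xs.any f || xs.any g) := by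
  induction xs with
  | nil => simp
  | cons x xs ih =>
    simp only [List.any_cons, ih]
    cases f x <;> cases g x <;> simp

theorem any_congr_mem {α : Type} (l : List α) (f g : α → Bool)
    (h : ∀ a ∈ l, f a = g a) : l.any f = l.any g := by
  induction l with
  | nil => rfl
  | cons x xs ih =>
    simp only [List.any_cons, h x (List.mem_cons_self), ih (fun a ha => h a (List.mem_cons_of_mem _ ha))]

theorem pvScanAny_eq_any_isIn (pats : List (List Char)) (h : ∀ p ∈ pats, p ≠ [])
    (s : List Char) :
    pvScanAny pats s = pats.any (fun p => PySem.Chars.isIn p s) := by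
  induction s with
  | nil =>
    simp only [pvScanAny]
    symm
    simp only [List.any_eq_false]
    intro p hp
    have := h p hp
    simp only [Bool.not_eq_true, PySem.Chars.isIn_eq_false_iff]
    intro hin
    exact this (List.eq_nil_of_infix_nil hin)
  | cons c rest ih =>
    simp only [pvScanAny, ih]
    have : ∀ p ∈ pats,
        PySem.Chars.isIn p (c :: rest)
          = (PySem.Chars.startswith (c :: rest) p || PySem.Chars.isIn p rest) := by
      intro p _
      by_cases hin : p <:+: c :: rest
      · rw [List.infix_cons_iff] at hin
        cases hin with
        | inl hpre =>
          have h1 : PySem.Chars.isIn p (c :: rest) = true := by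
            rw [PySem.Chars.isIn_iff_infix]; exact (List.infix_cons_iff).mpr (Or.inl hpre)
          have h2 : PySem.Chars.startswith (c :: rest) p = true := by
            rw [PySem.Chars.startswith_iff]; exact hpre
          simp [h1, h2]
        | inr hsuf =>
          have h1 : PySem.Chars.isIn p (c :: rest) = true := by
            rw [PySem.Chars.isIn_iff_infix]; exact (List.infix_cons_iff).mpr (Or.inr hsuf)
          have h3 : PySem.Chars.isIn p rest = true := by
            rw [PySem.Chars.isIn_iff_infix]; exact hsuf
          simp [h1, h3]
      · have h1 : PySem.Chars.isIn p (c :: rest) = false := by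
          rw [PySem.Chars.isIn_eq_false_iff]; exact hin
        have h2 : PySem.Chars.startswith (c :: rest) p = false := by
          rw [Bool.eq_false_iff]; intro hs
          exact hin ((List.infix_cons_iff).mpr (Or.inl ((PySem.Chars.startswith_iff _ _).mp hs)))
        have h3 : PySem.Chars.isIn p rest = false := by
          rw [PySem.Chars.isIn_eq_false_iff]; intro hs
          exact hin ((List.infix_cons_iff).mpr (Or.inr hs))
        simp [h1, h2, h3]
    rw [any_congr_mem _ _ _ this, any_or_split]

theorem pvSide_eq (pats : List String) (h : ∀ p ∈ pats, p ≠ "") (s : String) :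
    pvScanAny (pats.map String.toList) (PySem.Chars.lower s.toList)
      = pats.any (fun p => PySem.Str.isIn p (PySem.Str.lower s)) := by
  have h' : ∀ q ∈ pats.map String.toList, q ≠ [] := by
    intro q hq
    obtain ⟨p, hp, rfl⟩ := List.mem_map.mp hq
    simpa [String.toList_eq_nil_iff] using h p hp
  rw [pvScanAny_eq_any_isIn _ h', List.any_map]
  apply any_congr_mem
  intro p _
  simp [PySem.Str.isIn, PySem.Str.lower]

-- ===== VERDICT (by name: the statement is the Claim_ definition above) =====
theorem is_utility_link_spec : Claim_equal_is_utility_link := by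
  intro href text _
  unfold Spec_is_utility_link is_utility_link is_utility_link_alt
  rw [pvSide_eq pvUtilityPatterns (by decide), pvSide_eq pvUtilityIndicators (by decide)]
  split_ifs with h1 h2
  · rfl
  · exact h2.symm
  · simp only [Bool.not_eq_true] at h2
    exact h2.symm
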